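-- pv_equiv track=rewrite | github.com/mohit-kumar-27/Community-Detection | community_Mohit_Kumar_19825.py | partition_update
-- ===== SOURCE A (Python) =====
-- from collections import defaultdict
--
-- def partition_update(node2com_new, partition):
--     # Updates the community id of the nodes
--
--     reverse_partition = defaultdict(list)
--     for node, cid in partition.items():
--         reverse_partition[cid].append(node)
--     for old_cid, new_cid in node2com_new.items():
--         for old_com in reverse_partition[old_cid]:
--             partition[old_com] = new_cid
--
--     return partition
-- ===== SOURCE B (Python) =====
-- def partition_update(node2com_new, partition):
--     # Single direct pass: remap each node's community id via node2com_new.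
--     for node, cid in list(partition.items()):
--         if cid in node2com_new:
--             partition[node] = node2com_new[cid]
--     return partition
-- ===== Notes on version B (the rewrite author's own statement) =====
-- stated objective: simpler
-- what changed: B removes A's intermediate reverse index (community id -> list of nodes) and its nested loop over node2com_new, replacing them with a single direct pass over partition that looks each node's community id up in node2com_new.
import Mathlib
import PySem

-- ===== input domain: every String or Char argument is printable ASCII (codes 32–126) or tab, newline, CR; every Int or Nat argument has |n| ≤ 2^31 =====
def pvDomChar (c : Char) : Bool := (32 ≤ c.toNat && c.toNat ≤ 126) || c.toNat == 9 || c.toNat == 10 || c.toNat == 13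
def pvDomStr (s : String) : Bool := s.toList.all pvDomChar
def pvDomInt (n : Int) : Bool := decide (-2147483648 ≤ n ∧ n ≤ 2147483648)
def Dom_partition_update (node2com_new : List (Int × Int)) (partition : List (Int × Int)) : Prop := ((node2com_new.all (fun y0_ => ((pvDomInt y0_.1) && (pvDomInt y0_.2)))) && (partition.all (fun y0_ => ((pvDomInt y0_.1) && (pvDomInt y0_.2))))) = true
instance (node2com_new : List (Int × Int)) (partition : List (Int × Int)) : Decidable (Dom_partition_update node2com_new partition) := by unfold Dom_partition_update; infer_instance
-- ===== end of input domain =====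

-- B drops A's reverse index (cid -> list of nodes) and remaps each node in one direct pass
-- over partition, looking its community id up in node2com_new (objective: simpler).
-- In Python both A and B mutate and return the partition dict itself; the equivalence
-- proved here is about the returned dict's items.

-- ===== PORT A =====
def partition_update (node2com_new : List (Int × Int)) (partition : List (Int × Int)) : List (Int × Int) :=
  let n2c := PySem.Dict.ofList node2com_new
  let part := PySem.Dict.ofList partition
  -- reverse_partition = defaultdict(list); for node, cid in partition.items(): reverse_partition[cid].append(node)
  let rev := part.items.foldl (fun r p => r.modify p.2 [] (· ++ [p.1])) PySem.Dict.empty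
  -- for old_cid, new_cid in node2com_new.items(): for old_com in reverse_partition[old_cid]: partition[old_com] = new_cid
  -- (a defaultdict(list) read of a missing key yields []; getD with default [] is exact for these reads)
  let fin := n2c.items.foldl
    (fun pd q => (rev.getD q.1 []).foldl (fun pd node => pd.insert node q.2) pd) part
  fin.items

-- ===== PORT B =====
def partition_update_alt (node2com_new : List (Int × Int)) (partition : List (Int × Int)) : List (Int × Int) :=
  let n2c := PySem.Dict.ofList node2com_new
  let part := PySem.Dict.ofList partition
  -- for node, cid in list(partition.items()): if cid in node2com_new: partition[node] = node2com_new[cid]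
  let fin := part.items.foldl
    (fun pd p => match n2c.get? p.2 with
      | some v => pd.insert p.1 v
      | none => pd) part
  fin.items

-- ===== PRECONDITION & SPEC =====
def Spec_partition_update (node2com_new : List (Int × Int)) (partition : List (Int × Int)) (out : List (Int × Int)) : Prop := out = partition_update_alt node2com_new partition
instance (node2com_new : List (Int × Int)) (partition : List (Int × Int)) (out : List (Int × Int)) : Decidable (Spec_partition_update node2com_new partition out) := by unfold Spec_partition_update; infer_instance

-- ===== CLAIM (what is proved, stated in full; the proofs are below) =====
def Claim_equal_partition_update : Prop := ∀ (node2com_new : List (Int × Int)) (partition : List (Int × Int)), Dom_partition_update node2com_new partition → Spec_partition_update node2com_new partition (partition_update node2com_new partition)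

-- ===== LEMMAS AND PROOFS =====

theorem pv_inner_get? (ns : List Int) (pd : PySem.Dict Int Int) (nc k : Int) :
    (ns.foldl (fun pd node => pd.insert node nc) pd).get? k
      = if k ∈ ns then some nc else pd.get? k := by
  induction ns generalizing pd with
  | nil => simp
  | cons n rest ih =>
    simp only [List.foldl_cons, ih, List.mem_cons, PySem.Dict.get?_insert]
    by_cases hr : k ∈ rest
    · simp [hr]
    · by_cases hk : k = n <;> simp [hr, hk]

theorem pv_inner_contains (ns : List Int) (pd : PySem.Dict Int Int) (nc x : Int)
    (h : pd.contains x = true) :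
    (ns.foldl (fun pd node => pd.insert node nc) pd).contains x = true := by
  induction ns generalizing pd with
  | nil => simpa
  | cons n rest ih =>
    simp only [List.foldl_cons]
    exact ih _ (by simp [PySem.Dict.contains_insert, h])

theorem pv_inner_keys (ns : List Int) (pd : PySem.Dict Int Int) (nc : Int)
    (h : ∀ n ∈ ns, pd.contains n = true) :
    (ns.foldl (fun pd node => pd.insert node nc) pd).keys = pd.keys := by
  induction ns generalizing pd with
  | nil => rfl
  | cons n rest ih =>
    simp only [List.foldl_cons]
    rw [ih _ (fun m hm => by simp [PySem.Dict.contains_insert, h m (List.mem_cons_of_mem _ hm)]),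
        PySem.Dict.keys_insert_of_contains _ nc (h n (List.mem_cons_self ..))]

theorem pv_A_get?_notmem (nodes : Int → List Int) (k c : Int)
    (hmem : ∀ oc, k ∈ nodes oc ↔ oc = c) :
    ∀ (l2 : List (Int × Int)) (pd : PySem.Dict Int Int), c ∉ l2.map (·.1) →
    (l2.foldl (fun pd q => (nodes q.1).foldl (fun pd node => pd.insert node q.2) pd) pd).get? k
      = pd.get? k := by
  intro l2
  induction l2 with
  | nil => intro pd _; rfl
  | cons q rest ih =>
    intro pd hc
    simp only [List.map_cons, List.mem_cons] at hc
    push Not at hc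
    simp only [List.foldl_cons]
    rw [ih _ hc.2, pv_inner_get?]
    have : k ∉ nodes q.1 := by rw [hmem]; exact fun h => hc.1 h.symm
    simp [this]

theorem pv_A_get?_mem (nodes : Int → List Int) (k c : Int)
    (hmem : ∀ oc, k ∈ nodes oc ↔ oc = c) :
    ∀ (l2 : List (Int × Int)) (pd : PySem.Dict Int Int) (v : Int),
    (l2.map (·.1)).Nodup → (c, v) ∈ l2 →
    (l2.foldl (fun pd q => (nodes q.1).foldl (fun pd node => pd.insert node q.2) pd) pd).get? k
      = some v := by
  intro l2
  induction l2 with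
  | nil => intro pd v _ h; cases h
  | cons q rest ih =>
    intro pd v hnd hcv
    simp only [List.map_cons, List.nodup_cons] at hnd
    simp only [List.foldl_cons]
    rcases List.mem_cons.mp hcv with heq | hr
    · subst heq
      rw [pv_A_get?_notmem nodes k c hmem rest _ hnd.1, pv_inner_get?]
      simp [hmem]
    · exact ih _ v hnd.2 hr

theorem pv_A_keys (nodes : Int → List Int) :
    ∀ (l2 : List (Int × Int)) (pd : PySem.Dict Int Int),
    (∀ q ∈ l2, ∀ n ∈ nodes q.1, pd.contains n = true) →
    (l2.foldl (fun pd q => (nodes q.1).foldl (fun pd node => pd.insert node q.2) pd) pd).keys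
      = pd.keys := by
  intro l2
  induction l2 with
  | nil => intro pd _; rfl
  | cons q rest ih =>
    intro pd h
    simp only [List.foldl_cons]
    rw [ih _ (fun q' hq' n hn =>
          pv_inner_contains _ _ _ _ (h q' (List.mem_cons_of_mem _ hq') n hn)),
        pv_inner_keys _ _ _ (h q (List.mem_cons_self ..))]

theorem pv_B_get?_notmem (n2c : PySem.Dict Int Int) :
    ∀ (l : List (Int × Int)) (pd : PySem.Dict Int Int) (k : Int), k ∉ l.map (·.1) →
    (l.foldl (fun pd p => match n2c.get? p.2 with
      | some v => pd.insert p.1 v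
      | none => pd) pd).get? k = pd.get? k := by
  intro l
  induction l with
  | nil => intro pd k _; rfl
  | cons p rest ih =>
    intro pd k hk
    simp only [List.map_cons, List.mem_cons] at hk
    push Not at hk
    simp only [List.foldl_cons]
    rw [ih _ _ hk.2]
    cases n2c.get? p.2 with
    | none => rfl
    | some v => simp [PySem.Dict.get?_insert, hk.1]

theorem pv_B_get?_mem (n2c : PySem.Dict Int Int) :
    ∀ (l : List (Int × Int)) (pd : PySem.Dict Int Int) (k c : Int),
    (l.map (·.1)).Nodup → (k, c) ∈ l →
    (l.foldl (fun pd p => match n2c.get? p.2 with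
      | some v => pd.insert p.1 v
      | none => pd) pd).get? k
      = (match n2c.get? c with | some v => some v | none => pd.get? k) := by
  intro l
  induction l with
  | nil => intro pd k c _ h; cases h
  | cons p rest ih =>
    intro pd k c hnd hkc
    simp only [List.map_cons, List.nodup_cons] at hnd
    simp only [List.foldl_cons]
    rcases List.mem_cons.mp hkc with heq | hr
    · subst heq
      rw [pv_B_get?_notmem n2c rest _ k hnd.1]
      cases n2c.get? c with
      | none => rfl
      | some v => simp
    · have hne : p.1 ≠ k := by
        intro h; exact hnd.1 (h ▸ List.mem_map.mpr ⟨(k, c), hr, rfl⟩)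
      rw [ih _ k c hnd.2 hr]
      cases n2c.get? c with
      | none =>
        cases n2c.get? p.2 with
        | none => rfl
        | some v => simp [PySem.Dict.get?_insert, Ne.symm hne]
      | some v => rfl

theorem pv_B_keys (n2c : PySem.Dict Int Int) :
    ∀ (l : List (Int × Int)) (pd : PySem.Dict Int Int),
    (∀ p ∈ l, pd.contains p.1 = true) →
    (l.foldl (fun pd p => match n2c.get? p.2 with
      | some v => pd.insert p.1 v
      | none => pd) pd).keys = pd.keys := by
  intro l
  induction l with
  | nil => intro pd _; rfl
  | cons p rest ih =>
    intro pd h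
    simp only [List.foldl_cons]
    cases hg : n2c.get? p.2 with
    | none =>
      exact ih _ (fun p' hp' => h p' (List.mem_cons_of_mem _ hp'))
    | some v =>
      rw [ih _ (fun p' hp' => by
            simp [PySem.Dict.contains_insert, h p' (List.mem_cons_of_mem _ hp')]),
          PySem.Dict.keys_insert_of_contains _ v (h p (List.mem_cons_self ..))]

theorem pv_rev_getD (items : List (Int × Int)) (oc : Int) :
    (items.foldl (fun r p => r.modify p.2 [] (· ++ [p.1])) PySem.Dict.empty).getD oc []
      = (items.filter (fun p => p.2 == oc)).map (·.1) := by
  have h : items.foldl (fun r p => r.modify p.2 [] (· ++ [p.1])) PySem.Dict.empty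
      = (items.map (fun p => (p.2, p.1))).foldl
          (fun r q => r.modify q.1 [] (· ++ [q.2])) PySem.Dict.empty := by
    rw [List.foldl_map]
  rw [h, PySem.Dict.getD_foldl_modify_append, List.filter_map, List.map_map]
  simp [Function.comp_def]

theorem pv_mem_nodes (part : PySem.Dict Int Int) (k c : Int)
    (hnd : part.keys.Nodup) (hkc : (k, c) ∈ part.items) (oc : Int) :
    k ∈ (part.items.filter (fun p => p.2 == oc)).map (·.1) ↔ oc = c := by
  constructor
  · intro h
    rcases List.mem_map.mp h with ⟨p, hp, hp1⟩
    rcases List.mem_filter.mp hp with ⟨hpi, hp2⟩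
    have h1 : part.get? k = some c := PySem.Dict.get?_of_mem_items _ hkc hnd
    have h2 : part.get? k = some p.2 := by
      have hpi' : (p.1, p.2) ∈ part.items := by simpa using hpi
      rw [← hp1]; exact PySem.Dict.get?_of_mem_items _ hpi' hnd
    have hc : p.2 = c := by rw [h1] at h2; exact (Option.some_injective _ h2.symm)
    have ho : p.2 = oc := by simpa using hp2
    omega
  · intro h
    subst h
    exact List.mem_map.mpr ⟨(k, oc), List.mem_filter.mpr ⟨hkc, by simp⟩, rfl⟩

theorem pv_main (node2com_new : List (Int × Int)) (partition : List (Int × Int)) :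
    partition_update node2com_new partition = partition_update_alt node2com_new partition := by
  unfold partition_update partition_update_alt
  set n2c := PySem.Dict.ofList node2com_new with hn2c
  set part := PySem.Dict.ofList partition with hpart
  have hndp : part.keys.Nodup := PySem.Dict.nodup_keys_ofList _
  have hndn : n2c.keys.Nodup := PySem.Dict.nodup_keys_ofList _
  have hkeysp : part.keys = part.items.map (·.1) := by simp only [PySem.Dict.keys]
  have hkeysn : n2c.keys = n2c.items.map (·.1) := by simp only [PySem.Dict.keys]
  set nodes := fun oc => (part.items.filter (fun p => p.2 == oc)).map (·.1) with hnodes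
  have hfun : (fun (pd : PySem.Dict Int Int) (q : Int × Int) =>
        ((part.items.foldl (fun r p => r.modify p.2 [] (· ++ [p.1])) PySem.Dict.empty).getD q.1 []).foldl
          (fun pd node => pd.insert node q.2) pd)
      = (fun pd q => (nodes q.1).foldl (fun pd node => pd.insert node q.2) pd) := by
    funext pd q
    rw [pv_rev_getD]
  simp only [hfun]
  set finA := n2c.items.foldl (fun pd q => (nodes q.1).foldl (fun pd node => pd.insert node q.2) pd) part with hfA
  set finB := part.items.foldl (fun pd p => match n2c.get? p.2 with
      | some v => pd.insert p.1 v
      | none => pd) part with hfB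
  have hcont : ∀ n ∈ part.keys, part.contains n = true := by
    intro n hn; exact (PySem.Dict.contains_iff_mem_keys _ _).mpr hn
  have hkA : finA.keys = part.keys := by
    apply pv_A_keys
    intro q _ n hn
    apply hcont
    rcases List.mem_map.mp hn with ⟨p, hp, hp1⟩
    exact hp1 ▸ PySem.Dict.mem_keys_of_mem_items part (List.mem_filter.mp hp).1
  have hkB : finB.keys = part.keys := by
    apply pv_B_keys
    intro p hp
    exact hcont _ (PySem.Dict.mem_keys_of_mem_items part hp)
  have hndA : finA.keys.Nodup := hkA ▸ hndp
  have hndB : finB.keys.Nodup := hkB ▸ hndp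
  rw [PySem.Dict.items_eq_map_keys finA hndA 0, PySem.Dict.items_eq_map_keys finB hndB 0,
      hkA, hkB]
  apply List.map_congr_left
  intro k hk
  have hex : ∃ c, (k, c) ∈ part.items := by
    rw [hkeysp] at hk
    rcases List.mem_map.mp hk with ⟨p, hp, hp1⟩
    exact ⟨p.2, by rw [← hp1]; simpa using hp⟩
  rcases hex with ⟨c, hkc⟩
  have hndfst : (part.items.map (·.1)).Nodup := hkeysp ▸ hndp
  have hndfstn : (n2c.items.map (·.1)).Nodup := hkeysn ▸ hndn
  have hB : finB.get? k = (match n2c.get? c with | some v => some v | none => part.get? k) :=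
    pv_B_get?_mem n2c part.items part k c hndfst hkc
  have hgk : part.get? k = some c := PySem.Dict.get?_of_mem_items _ hkc hndp
  have hA : finA.get? k = (match n2c.get? c with | some v => some v | none => part.get? k) := by
    cases hg : n2c.get? c with
    | some v =>
      exact pv_A_get?_mem nodes k c (pv_mem_nodes part k c hndp hkc) n2c.items part v
        hndfstn (PySem.Dict.mem_items_of_get?_eq_some _ hg)
    | none =>
      apply pv_A_get?_notmem nodes k c (pv_mem_nodes part k c hndp hkc) n2c.items part
      rw [← hkeysn]
      exact (PySem.Dict.get?_eq_none_iff_not_mem_keys _ _).mp hg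
  have : finA.get? k = finB.get? k := by rw [hA, hB]
  simp [PySem.Dict.getD_eq_get?_getD, this]

-- ===== VERDICT (by name: the statement is the Claim_ definition above) =====
theorem partition_update_spec : Claim_equal_partition_update := by
  intro node2com_new partition _
  unfold Spec_partition_update
  exact pv_main node2com_new partition
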